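-- pv_equiv track=rewrite | github.com/Isaac-McPadden/Farkle_II | src/farkle/analysis/reporting.py | _tier_buckets_from_ranked
-- ===== SOURCE A (Python) =====
-- from typing import Iterable, Mapping, Sequence, SupportsFloat, cast
--
-- TIER_LABELS = ("S", "A", "B", "C", "D", "F")
--
-- TIER_BUCKET_SIZES = (100, 200, 400, 800, 1600)
--
-- def _tier_buckets_from_ranked(ranked: Sequence[str]) -> dict[str, list[str]]:
--     """Bucket ordered strategies into fixed-size tier labels."""
--     if not ranked:
--         return {}
--     seen: set[str] = set()
--     unique_ranked: list[str] = []
--     for strategy in ranked: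
--         if strategy in seen:
--             continue
--         seen.add(strategy)
--         unique_ranked.append(strategy)
--     buckets: dict[str, list[str]] = {}
--     start = 0
--     for label, size in zip(TIER_LABELS[:-1], TIER_BUCKET_SIZES, strict=False):
--         end = min(len(unique_ranked), start + size)
--         buckets[label] = unique_ranked[start:end]
--         start = end
--     buckets[TIER_LABELS[-1]] = unique_ranked[start:]
--     return {label: members for label, members in buckets.items() if members}
-- ===== SOURCE B (Python) =====
-- TIER_LABELS = ("S", "A", "B", "C", "D", "F")
-- TIER_BUCKET_SIZES = (100, 200, 400, 800, 1600)
--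
-- # cumulative upper boundaries of the sized tiers (F is unbounded)
-- _TIER_BOUNDS = (100, 300, 700, 1500, 3100)
--
--
-- def _label_for(count):
--     """Tier label of the strategy whose 0-based unique rank is ``count``."""
--     for label, bound in zip(TIER_LABELS, _TIER_BOUNDS):
--         if count < bound:
--             return label
--     return TIER_LABELS[-1]
--
--
-- def _tier_buckets_from_ranked(ranked):
--     """Single pass: dedup and bucket each strategy as it is seen."""
--     seen = set()
--     buckets = {}
--     count = 0
--     for strategy in ranked:
--         if strategy in seen:
--             continue
--         seen.add(strategy)
--         buckets.setdefault(_label_for(count), []).append(strategy)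
--         count += 1
--     return buckets
-- ===== Notes on version B (the rewrite author's own statement) =====
-- stated objective: alternative
-- what changed: B fuses dedup and bucketing into one element-wise pass that appends each newly-seen strategy directly into its tier (looked up from a running unique count against cumulative boundaries), creating tiers lazily so no slice-by-tier pass and no final empty-tier filter is needed.
import Mathlib
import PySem

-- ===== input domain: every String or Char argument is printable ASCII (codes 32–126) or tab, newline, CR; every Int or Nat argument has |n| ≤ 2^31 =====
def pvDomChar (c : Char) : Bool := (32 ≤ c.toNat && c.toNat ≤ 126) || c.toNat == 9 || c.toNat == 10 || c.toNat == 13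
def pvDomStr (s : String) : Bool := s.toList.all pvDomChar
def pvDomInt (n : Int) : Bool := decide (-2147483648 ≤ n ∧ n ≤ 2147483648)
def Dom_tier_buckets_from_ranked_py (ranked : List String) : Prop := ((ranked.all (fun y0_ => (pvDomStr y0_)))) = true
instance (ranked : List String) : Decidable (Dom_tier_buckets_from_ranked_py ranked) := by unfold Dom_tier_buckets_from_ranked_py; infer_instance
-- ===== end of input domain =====

-- B fuses dedup and bucketing into one element-wise pass with a running unique count (no slice-by-tier pass, no final empty-tier filter); objective: alternative decomposition, same cost.



-- ===== PORT A =====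
-- zip(TIER_LABELS[:-1], TIER_BUCKET_SIZES) — labels paired with their (non-cumulative) sizes
def pvSizePairs : List (String × Int) := [("S", 100), ("A", 200), ("B", 400), ("C", 800), ("D", 1600)]

def tier_buckets_from_ranked_py (ranked : List String) : List (String × List String) :=
  if ranked = [] then []
  else
    let du := ranked.foldl (fun (p : PySem.Set String × List String) strategy =>
      if PySem.Set.contains p.1 strategy then p
      else (PySem.Set.add p.1 strategy, p.2 ++ [strategy])) (PySem.Set.empty, [])
    let unique := du.2
    let bs := pvSizePairs.foldl
      (fun (q : PySem.Dict String (List String) × Int) ls =>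
        let en := min (PySem.List.len unique) (q.2 + ls.2)
        (q.1.insert ls.1 (PySem.List.slice unique (some q.2) (some en)), en))
      (PySem.Dict.empty, 0)
    let buckets := bs.1.insert "F" (PySem.List.slice unique (some bs.2) none)
    -- final dict comprehension: keys of `buckets` are distinct, so the filtered items ARE the new dict (assoc-list convention)
    buckets.items.filter (fun p => decide (p.2 ≠ []))

-- ===== PORT B =====
-- zip(TIER_LABELS, _TIER_BOUNDS) — labels paired with cumulative upper boundaries
def pvBoundPairs : List (String × Int) := [("S", 100), ("A", 300), ("B", 700), ("C", 1500), ("D", 3100)]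

-- Source B's _label_for: first label whose bound exceeds count, else "F"
def labelFor_py : List (String × Int) → Int → String
  | [], _ => "F"
  | lb :: rest, count => if count < lb.2 then lb.1 else labelFor_py rest count

def tier_buckets_from_ranked_py_alt (ranked : List String) : List (String × List String) :=
  (ranked.foldl (fun (st : PySem.Set String × PySem.Dict String (List String) × Int) strategy =>
      if PySem.Set.contains st.1 strategy then st
      else (PySem.Set.add st.1 strategy,
            -- buckets.setdefault(label, []).append(strategy)
            st.2.1.modify (labelFor_py pvBoundPairs st.2.2) [] (· ++ [strategy]),
            st.2.2 + 1))
    (PySem.Set.empty, PySem.Dict.empty, 0)).2.1.items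

-- ===== PRECONDITION & SPEC =====
def Spec_tier_buckets_from_ranked_py (ranked : List String) (out : List (String × List String)) : Prop := out = tier_buckets_from_ranked_py_alt ranked
instance (ranked : List String) (out : List (String × List String)) : Decidable (Spec_tier_buckets_from_ranked_py ranked out) := by unfold Spec_tier_buckets_from_ranked_py; infer_instance

-- ===== CLAIM (what is proved, stated in full; the proofs are below) =====
def Claim_equal_tier_buckets_from_ranked_py : Prop := ∀ (ranked : List String), Dom_tier_buckets_from_ranked_py ranked → Spec_tier_buckets_from_ranked_py ranked (tier_buckets_from_ranked_py ranked)

-- ===== LEMMAS AND PROOFS =====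

def pvDedup (seen : PySem.Set String) : List String → List String
  | [] => []
  | s :: l => if PySem.Set.contains seen s then pvDedup seen l
              else s :: pvDedup (PySem.Set.add seen s) l

-- the bucketing core of B, on an already-deduplicated list
def pvBCore (d : PySem.Dict String (List String)) (n : Int) : List String → PySem.Dict String (List String)
  | [] => d
  | s :: l => pvBCore (d.modify (labelFor_py pvBoundPairs n) [] (· ++ [s])) (n + 1) l

-- members of u whose unique rank carries label L
theorem pvA_fold_snd (l : List String) (seen : PySem.Set String) (acc : List String) :
    (l.foldl (fun (p : PySem.Set String × List String) strategy =>
      if PySem.Set.contains p.1 strategy then p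
      else (PySem.Set.add p.1 strategy, p.2 ++ [strategy])) (seen, acc)).2
    = acc ++ pvDedup seen l := by
  induction l generalizing seen acc with
  | nil => simp [pvDedup]
  | cons s l ih =>
    simp only [List.foldl_cons, pvDedup]
    by_cases h : PySem.Set.contains seen s
    · simp only [h, if_true, ih]
    · simp only [h, if_false, Bool.false_eq_true, ih]
      simp

theorem pvB_fold (l : List String) (seen : PySem.Set String)
    (d : PySem.Dict String (List String)) (n : Int) :
    (l.foldl (fun (st : PySem.Set String × PySem.Dict String (List String) × Int) strategy =>
      if PySem.Set.contains st.1 strategy then st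
      else (PySem.Set.add st.1 strategy,
            st.2.1.modify (labelFor_py pvBoundPairs st.2.2) [] (· ++ [strategy]),
            st.2.2 + 1)) (seen, d, n)).2.1
    = pvBCore d n (pvDedup seen l) := by
  induction l generalizing seen d n with
  | nil => simp [pvDedup, pvBCore]
  | cons s l ih =>
    simp only [List.foldl_cons, pvDedup]
    by_cases h : PySem.Set.contains seen s
    · simp only [h, if_true, ih]
    · simp only [h, if_false, Bool.false_eq_true, ih, pvBCore]

-- pvBCore as a canonical grouping fold over enumerated, label-tagged pairs
theorem pvBCore_eq_fold (u : List String) (d : PySem.Dict String (List String)) (n : Int) :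
    pvBCore d n u
    = ((PySem.List.enumerate u n).map (fun p => (labelFor_py pvBoundPairs p.1, p.2))).foldl
        (fun d p => d.modify p.1 [] (· ++ [p.2])) d := by
  induction u generalizing d n with
  | nil => simp [pvBCore, PySem.List.enumerate_nil]
  | cons s u ih => simp [pvBCore, PySem.List.enumerate_cons, ih]

-- label characterizations
theorem pvLab_A (i : Int) : (labelFor_py pvBoundPairs i == "A") = (decide (100 ≤ i) && decide (i < 300)) := by
  simp only [pvBoundPairs, labelFor_py]
  split_ifs with h1 h2 h3 h4 h5 <;> simp_all <;> omega
theorem pvLab_B (i : Int) : (labelFor_py pvBoundPairs i == "B") = (decide (300 ≤ i) && decide (i < 700)) := by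
  simp only [pvBoundPairs, labelFor_py]
  split_ifs with h1 h2 h3 h4 h5 <;> simp_all <;> omega
theorem pvLab_C (i : Int) : (labelFor_py pvBoundPairs i == "C") = (decide (700 ≤ i) && decide (i < 1500)) := by
  simp only [pvBoundPairs, labelFor_py]
  split_ifs with h1 h2 h3 h4 h5 <;> simp_all <;> omega
theorem pvLab_D (i : Int) : (labelFor_py pvBoundPairs i == "D") = (decide (1500 ≤ i) && decide (i < 3100)) := by
  simp only [pvBoundPairs, labelFor_py]
  split_ifs with h1 h2 h3 h4 h5 <;> simp_all <;> omega
theorem pvLab_F (i : Int) : (labelFor_py pvBoundPairs i == "F") = decide (3100 ≤ i) := by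
  simp only [pvBoundPairs, labelFor_py]
  split_ifs with h1 h2 h3 h4 h5 <;> simp_all <;> omega
theorem pvLab_S' (i : Int) : (labelFor_py pvBoundPairs i == "S") = decide (i < 100) := by
  simp only [pvBoundPairs, labelFor_py]
  split_ifs with h1 h2 h3 h4 h5 <;> simp_all <;> omega

-- interval filters over enumerate
theorem pvFilterLt (u : List String) (s b : Int) :
    ((PySem.List.enumerate u s).filter (fun p => decide (p.1 < b))).map (·.2) = u.take (b - s).toNat := by
  induction u generalizing s with
  | nil => simp [PySem.List.enumerate_nil]
  | cons x u ih =>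
    simp only [PySem.List.enumerate_cons, List.filter_cons]
    by_cases h : s < b
    · have : (b - s).toNat = (b - (s+1)).toNat + 1 := by omega
      simp [h, ih, this]
    · have : (b - s).toNat = 0 := by omega
      have h2 : (b - (s+1)).toNat = 0 := by omega
      simp [h, ih, this, h2]

theorem pvFilterGe (u : List String) (s a : Int) :
    ((PySem.List.enumerate u s).filter (fun p => decide (a ≤ p.1))).map (·.2) = u.drop (a - s).toNat := by
  induction u generalizing s with
  | nil => simp [PySem.List.enumerate_nil]
  | cons x u ih =>
    simp only [PySem.List.enumerate_cons, List.filter_cons]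
    by_cases h : a ≤ s
    · have h0 : (a - s).toNat = 0 := by omega
      have h1 : (a - (s+1)).toNat = 0 := by omega
      simp [h, ih, h0, h1]
    · have : (a - s).toNat = (a - (s+1)).toNat + 1 := by omega
      simp [h, ih, this]

theorem pvFilterBetween (u : List String) (s a b : Int) :
    ((PySem.List.enumerate u s).filter (fun p => decide (a ≤ p.1) && decide (p.1 < b))).map (·.2)
    = (u.take (b - s).toNat).drop (a - s).toNat := by
  induction u generalizing s with
  | nil => simp [PySem.List.enumerate_nil]
  | cons x u ih =>
    simp only [PySem.List.enumerate_cons, List.filter_cons]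
    by_cases hb : s < b
    · have htk : (b - s).toNat = (b - (s+1)).toNat + 1 := by omega
      by_cases ha : a ≤ s
      · have h1 : (a - (s+1)).toNat = 0 := by omega
        have h0 : (a - s).toNat = 0 := by omega
        simp [hb, ha, ih, htk, h0, h1]
      · have : (a - s).toNat = (a - (s+1)).toNat + 1 := by omega
        simp [hb, ha, ih, htk, this]
    · have h0 : (b - s).toNat = 0 := by omega
      have h1 : (b - (s+1)).toNat = 0 := by omega
      simp [hb, ih, h0, h1]

def pvGrouped (u : List String) (L : String) : List String :=
  ((PySem.List.enumerate u 0).filter (fun p => labelFor_py pvBoundPairs p.1 == L)).map (·.2)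

theorem pvGrouped_S (u : List String) : pvGrouped u "S" = u.take 100 := by
  have : (fun p : Int × String => labelFor_py pvBoundPairs p.1 == "S")
       = (fun p : Int × String => decide (p.1 < 100)) := by
    funext p; exact pvLab_S' p.1
  simp only [pvGrouped, this]
  simpa using pvFilterLt u 0 100

theorem pvGrouped_A (u : List String) : pvGrouped u "A" = (u.take 300).drop 100 := by
  have : (fun p : Int × String => labelFor_py pvBoundPairs p.1 == "A")
       = (fun p : Int × String => decide (100 ≤ p.1) && decide (p.1 < 300)) := by
    funext p; exact pvLab_A p.1
  simp only [pvGrouped, this]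
  simpa using pvFilterBetween u 0 100 300

theorem pvGrouped_F (u : List String) : pvGrouped u "F" = u.drop 3100 := by
  have : (fun p : Int × String => labelFor_py pvBoundPairs p.1 == "F")
       = (fun p : Int × String => decide (3100 ≤ p.1)) := by
    funext p; exact pvLab_F p.1
  simp only [pvGrouped, this]
  simpa using pvFilterGe u 0 3100
theorem pvGrouped_B (u : List String) : pvGrouped u "B" = (u.take 700).drop 300 := by
  have : (fun p : Int × String => labelFor_py pvBoundPairs p.1 == "B")
       = (fun p : Int × String => decide (300 ≤ p.1) && decide (p.1 < 700)) := by
    funext p; exact pvLab_B p.1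
  simp only [pvGrouped, this]
  simpa using pvFilterBetween u 0 300 700

theorem pvGrouped_C (u : List String) : pvGrouped u "C" = (u.take 1500).drop 700 := by
  have : (fun p : Int × String => labelFor_py pvBoundPairs p.1 == "C")
       = (fun p : Int × String => decide (700 ≤ p.1) && decide (p.1 < 1500)) := by
    funext p; exact pvLab_C p.1
  simp only [pvGrouped, this]
  simpa using pvFilterBetween u 0 700 1500

theorem pvGrouped_D (u : List String) : pvGrouped u "D" = (u.take 3100).drop 1500 := by
  have : (fun p : Int × String => labelFor_py pvBoundPairs p.1 == "D")
       = (fun p : Int × String => decide (1500 ≤ p.1) && decide (p.1 < 3100)) := by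
    funext p; exact pvLab_D p.1
  simp only [pvGrouped, this]
  simpa using pvFilterBetween u 0 1500 3100

-- the dict built by pvBCore: keys and values
theorem pvBCore_keys (u : List String) :
    (pvBCore PySem.Dict.empty 0 u).keys
    = PySem.Set.ofList ((PySem.List.enumerate u 0).map (fun p => labelFor_py pvBoundPairs p.1)) := by
  rw [pvBCore_eq_fold]
  rw [List.foldl_map]
  have h := PySem.Dict.keys_foldl_modify_key (PySem.List.enumerate u (0:Int))
      (fun p : Int × String => labelFor_py pvBoundPairs p.1) ([] : List String)
      (fun _ p => (· ++ [p.2])) PySem.Dict.empty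
  simpa [List.map_map, Function.comp] using h

theorem pvBCore_nodup (u : List String) : (pvBCore PySem.Dict.empty 0 u).keys.Nodup := by
  rw [pvBCore_eq_fold, List.foldl_map]
  exact PySem.Dict.nodup_keys_foldl_modify_key _ _ _ _ _ (by simp)

theorem pvBCore_getD (u : List String) (L : String) :
    (pvBCore PySem.Dict.empty 0 u).getD L [] = pvGrouped u L := by
  rw [pvBCore_eq_fold]
  rw [PySem.Dict.getD_foldl_modify_append]
  simp only [pvGrouped, List.filter_map, List.map_map]
  rfl
-- constant-valued labels on each index range
theorem pvLabVal_S (x : Int) (h : x < 100) : labelFor_py pvBoundPairs x = "S" := by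
  simp only [labelFor_py, pvBoundPairs]; rw [if_pos (by omega)]
theorem pvLabVal_A (x : Int) (h1 : 100 ≤ x) (h2 : x < 300) : labelFor_py pvBoundPairs x = "A" := by
  simp only [labelFor_py, pvBoundPairs]; rw [if_neg (by omega), if_pos (by omega)]
theorem pvLabVal_B (x : Int) (h1 : 300 ≤ x) (h2 : x < 700) : labelFor_py pvBoundPairs x = "B" := by
  simp only [labelFor_py, pvBoundPairs]; rw [if_neg (by omega), if_neg (by omega), if_pos (by omega)]
theorem pvLabVal_C (x : Int) (h1 : 700 ≤ x) (h2 : x < 1500) : labelFor_py pvBoundPairs x = "C" := by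
  simp only [labelFor_py, pvBoundPairs]
  rw [if_neg (by omega), if_neg (by omega), if_neg (by omega), if_pos (by omega)]
theorem pvLabVal_D (x : Int) (h1 : 1500 ≤ x) (h2 : x < 3100) : labelFor_py pvBoundPairs x = "D" := by
  simp only [labelFor_py, pvBoundPairs]
  rw [if_neg (by omega), if_neg (by omega), if_neg (by omega), if_neg (by omega), if_pos (by omega)]
theorem pvLabVal_F (x : Int) (h1 : 3100 ≤ x) : labelFor_py pvBoundPairs x = "F" := by
  simp only [labelFor_py, pvBoundPairs]
  rw [if_neg (by omega), if_neg (by omega), if_neg (by omega), if_neg (by omega), if_neg (by omega)]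

-- folding `Set.add` over a constant nonempty list adds the constant once
theorem pvFoldAdd_const (ys : List Int) (s : PySem.Set String) (L : String)
    (h : ∀ x ∈ ys, labelFor_py pvBoundPairs x = L) (hne : ys ≠ []) :
    (ys.map (labelFor_py pvBoundPairs)).foldl PySem.Set.add s = PySem.Set.add s L := by
  induction ys generalizing s with
  | nil => exact absurd rfl hne
  | cons y ys ih =>
    simp only [List.map_cons, List.foldl_cons]
    rw [h y (by simp)]
    by_cases h0 : ys = []
    · subst h0; simp
    · rw [ih (PySem.Set.add s L) (fun x hx => h x (by simp [hx])) h0]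
      have : PySem.Set.add (PySem.Set.add s L) L = PySem.Set.add s L := by
        simp only [PySem.Set.add, PySem.Set.contains]
        split_ifs with hm hm2 <;> simp_all
      rw [this]
-- split the index range at a boundary and absorb a constant-label block
theorem pvSplitStep (s : PySem.Set String) (a b : Int) (L : String) (hab : a < b)
    (hconst : ∀ x, a ≤ x → x < b → labelFor_py pvBoundPairs x = L) :
    ((PySem.List.pyRange a b 1).map (labelFor_py pvBoundPairs)).foldl PySem.Set.add s
    = PySem.Set.add s L := by
  refine pvFoldAdd_const _ s L (fun x hx => ?_) ?_
  · rw [PySem.List.mem_pyRange_one] at hx; exact hconst x hx.1 hx.2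
  · rw [PySem.List.pyRange_one_cons hab]; simp

theorem pvLabSet (n : Int) (hn : 0 ≤ n) :
    PySem.Set.ofList ((PySem.List.pyRange 0 n 1).map (labelFor_py pvBoundPairs)) =
    (if n ≤ 0 then [] else if n ≤ 100 then ["S"] else if n ≤ 300 then ["S", "A"]
     else if n ≤ 700 then ["S", "A", "B"] else if n ≤ 1500 then ["S", "A", "B", "C"]
     else if n ≤ 3100 then ["S", "A", "B", "C", "D"] else ["S", "A", "B", "C", "D", "F"]) := by
  rw [PySem.Set.ofList_eq_foldl]
  split_ifs with h1 h2 h3 h4 h5 h6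
  · rw [PySem.List.pyRange_one_eq_nil h1]; rfl
  · rw [PySem.List.pyRange_one_append 0 n n (by omega) (by omega)]  -- no-op split; just use one block
    simp only [List.map_append, List.foldl_append]
    rw [pvSplitStep _ 0 n "S" (by omega) (fun x hx1 hx2 => pvLabVal_S x (by omega))]
    rw [PySem.List.pyRange_one_eq_nil (by omega)]
    rfl
  · rw [PySem.List.pyRange_one_append 0 100 n (by omega) (by omega)]
    simp only [List.map_append, List.foldl_append]
    rw [pvSplitStep _ 0 100 "S" (by omega) (fun x hx1 hx2 => pvLabVal_S x (by omega))]
    rw [pvSplitStep _ 100 n "A" (by omega) (fun x hx1 hx2 => pvLabVal_A x (by omega) (by omega))]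
    decide
  · rw [PySem.List.pyRange_one_append 0 300 n (by omega) (by omega),
        PySem.List.pyRange_one_append 0 100 300 (by omega) (by omega)]
    simp only [List.map_append, List.foldl_append]
    rw [pvSplitStep _ 0 100 "S" (by omega) (fun x hx1 hx2 => pvLabVal_S x (by omega))]
    rw [pvSplitStep _ 100 300 "A" (by omega) (fun x hx1 hx2 => pvLabVal_A x (by omega) (by omega))]
    rw [pvSplitStep _ 300 n "B" (by omega) (fun x hx1 hx2 => pvLabVal_B x (by omega) (by omega))]
    decide
  · rw [PySem.List.pyRange_one_append 0 700 n (by omega) (by omega),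
        PySem.List.pyRange_one_append 0 300 700 (by omega) (by omega),
        PySem.List.pyRange_one_append 0 100 300 (by omega) (by omega)]
    simp only [List.map_append, List.foldl_append]
    rw [pvSplitStep _ 0 100 "S" (by omega) (fun x hx1 hx2 => pvLabVal_S x (by omega))]
    rw [pvSplitStep _ 100 300 "A" (by omega) (fun x hx1 hx2 => pvLabVal_A x (by omega) (by omega))]
    rw [pvSplitStep _ 300 700 "B" (by omega) (fun x hx1 hx2 => pvLabVal_B x (by omega) (by omega))]
    rw [pvSplitStep _ 700 n "C" (by omega) (fun x hx1 hx2 => pvLabVal_C x (by omega) (by omega))]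
    decide
  · rw [PySem.List.pyRange_one_append 0 1500 n (by omega) (by omega),
        PySem.List.pyRange_one_append 0 700 1500 (by omega) (by omega),
        PySem.List.pyRange_one_append 0 300 700 (by omega) (by omega),
        PySem.List.pyRange_one_append 0 100 300 (by omega) (by omega)]
    simp only [List.map_append, List.foldl_append]
    rw [pvSplitStep _ 0 100 "S" (by omega) (fun x hx1 hx2 => pvLabVal_S x (by omega))]
    rw [pvSplitStep _ 100 300 "A" (by omega) (fun x hx1 hx2 => pvLabVal_A x (by omega) (by omega))]
    rw [pvSplitStep _ 300 700 "B" (by omega) (fun x hx1 hx2 => pvLabVal_B x (by omega) (by omega))]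
    rw [pvSplitStep _ 700 1500 "C" (by omega) (fun x hx1 hx2 => pvLabVal_C x (by omega) (by omega))]
    rw [pvSplitStep _ 1500 n "D" (by omega) (fun x hx1 hx2 => pvLabVal_D x (by omega) (by omega))]
    decide
  · rw [PySem.List.pyRange_one_append 0 3100 n (by omega) (by omega),
        PySem.List.pyRange_one_append 0 1500 3100 (by omega) (by omega),
        PySem.List.pyRange_one_append 0 700 1500 (by omega) (by omega),
        PySem.List.pyRange_one_append 0 300 700 (by omega) (by omega),
        PySem.List.pyRange_one_append 0 100 300 (by omega) (by omega)]
    simp only [List.map_append, List.foldl_append]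
    rw [pvSplitStep _ 0 100 "S" (by omega) (fun x hx1 hx2 => pvLabVal_S x (by omega))]
    rw [pvSplitStep _ 100 300 "A" (by omega) (fun x hx1 hx2 => pvLabVal_A x (by omega) (by omega))]
    rw [pvSplitStep _ 300 700 "B" (by omega) (fun x hx1 hx2 => pvLabVal_B x (by omega) (by omega))]
    rw [pvSplitStep _ 700 1500 "C" (by omega) (fun x hx1 hx2 => pvLabVal_C x (by omega) (by omega))]
    rw [pvSplitStep _ 1500 3100 "D" (by omega) (fun x hx1 hx2 => pvLabVal_D x (by omega) (by omega))]
    rw [pvSplitStep _ 3100 n "F" (by omega) (fun x hx1 hx2 => pvLabVal_F x (by omega))]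
    decide
theorem pvBCore_items (u : List String) :
    (pvBCore PySem.Dict.empty 0 u).items
    = List.filter (fun p => decide (p.2 ≠ []))
        [("S", u.take 100), ("A", (u.take 300).drop 100), ("B", (u.take 700).drop 300),
         ("C", (u.take 1500).drop 700), ("D", (u.take 3100).drop 1500), ("F", u.drop 3100)] := by
  rw [PySem.Dict.items_eq_map_keys _ (pvBCore_nodup u) []]
  rw [pvBCore_keys]
  have hmap : (PySem.List.enumerate u 0).map (fun p => labelFor_py pvBoundPairs p.1)
      = (PySem.List.pyRange 0 (u.length : Int) 1).map (labelFor_py pvBoundPairs) := by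
    have h1 : (PySem.List.enumerate u 0).map (fun p => labelFor_py pvBoundPairs p.1)
        = ((PySem.List.enumerate u 0).map (·.1)).map (labelFor_py pvBoundPairs) := by
      simp [List.map_map, Function.comp]
    rw [h1, PySem.List.map_fst_enumerate]
    norm_num
  rw [hmap, pvLabSet (u.length : Int) (by positivity)]
  have dnil : ∀ (a : Nat) (h : u.length ≤ a), u.drop a = [] :=
    fun a h => List.drop_eq_nil_iff.mpr h
  have dtnil : ∀ (a b : Nat) (h : u.length ≤ a ∨ b ≤ a), (u.take b).drop a = [] := by
    intro a b h
    rw [List.drop_eq_nil_iff, List.length_take]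
    omega
  have dtne : ∀ (a b : Nat) (h1 : a < u.length) (h2 : a < b), (u.take b).drop a ≠ [] := by
    intro a b h1 h2
    rw [ne_eq, List.drop_eq_nil_iff, List.length_take]
    omega
  have hune0 : 0 < u.length → u ≠ [] := fun h => List.ne_nil_of_length_pos h
  split_ifs with h1 h2 h3 h4 h5 h6
  · have hu : u = [] := by
      have : u.length = 0 := by omega
      simpa using this
    subst hu; simp
  · have hn : 0 < u.length ∧ u.length ≤ 100 := by omega
    simp [List.map_cons, pvBCore_getD, pvGrouped_S, pvGrouped_A, pvGrouped_B, pvGrouped_C,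
      pvGrouped_D, pvGrouped_F, List.filter_cons,
      dtne 0 100 hn.1 (by omega), dtnil 100 300 (by omega), dtnil 300 700 (by omega),
      dtnil 700 1500 (by omega), dtnil 1500 3100 (by omega), dnil 3100 (by omega),
      List.take_eq_nil_iff, hune0 (by omega)]
  · have hn : 100 < u.length ∧ u.length ≤ 300 := by omega
    simp [List.map_cons, pvBCore_getD, pvGrouped_S, pvGrouped_A, pvGrouped_B, pvGrouped_C,
      pvGrouped_D, pvGrouped_F, List.filter_cons,
      dtne 0 100 (by omega) (by omega), dtne 100 300 hn.1 (by omega), dtnil 300 700 (by omega),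
      dtnil 700 1500 (by omega), dtnil 1500 3100 (by omega), dnil 3100 (by omega),
      List.take_eq_nil_iff, hune0 (by omega)]
  · have hn : 300 < u.length ∧ u.length ≤ 700 := by omega
    simp [List.map_cons, pvBCore_getD, pvGrouped_S, pvGrouped_A, pvGrouped_B, pvGrouped_C,
      pvGrouped_D, pvGrouped_F, List.filter_cons,
      dtne 0 100 (by omega) (by omega), dtne 100 300 (by omega) (by omega),
      dtne 300 700 hn.1 (by omega), dtnil 700 1500 (by omega), dtnil 1500 3100 (by omega),
      dnil 3100 (by omega), List.take_eq_nil_iff, hune0 (by omega)]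
  · have hn : 700 < u.length ∧ u.length ≤ 1500 := by omega
    simp [List.map_cons, pvBCore_getD, pvGrouped_S, pvGrouped_A, pvGrouped_B, pvGrouped_C,
      pvGrouped_D, pvGrouped_F, List.filter_cons,
      dtne 0 100 (by omega) (by omega), dtne 100 300 (by omega) (by omega),
      dtne 300 700 (by omega) (by omega), dtne 700 1500 hn.1 (by omega),
      dtnil 1500 3100 (by omega), dnil 3100 (by omega), List.take_eq_nil_iff, hune0 (by omega)]
  · have hn : 1500 < u.length ∧ u.length ≤ 3100 := by omega
    simp [List.map_cons, pvBCore_getD, pvGrouped_S, pvGrouped_A, pvGrouped_B, pvGrouped_C,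
      pvGrouped_D, pvGrouped_F, List.filter_cons,
      dtne 0 100 (by omega) (by omega), dtne 100 300 (by omega) (by omega),
      dtne 300 700 (by omega) (by omega), dtne 700 1500 (by omega) (by omega),
      dtne 1500 3100 hn.1 (by omega), dnil 3100 (by omega), List.take_eq_nil_iff, hune0 (by omega)]
  · have hn : 3100 < u.length := by omega
    simp [List.map_cons, pvBCore_getD, pvGrouped_S, pvGrouped_A, pvGrouped_B, pvGrouped_C,
      pvGrouped_D, pvGrouped_F, List.filter_cons,
      dtne 0 100 (by omega) (by omega), dtne 100 300 (by omega) (by omega),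
      dtne 300 700 (by omega) (by omega), dtne 700 1500 (by omega) (by omega),
      dtne 1500 3100 (by omega) (by omega), List.take_eq_nil_iff, List.drop_eq_nil_iff, hune0 (by omega)]
    omega
theorem pvSliceClamp (u : List String) (a b : Nat) :
    PySem.List.slice u (some (min (u.length : Int) (a : Int))) (some (min (u.length : Int) (b : Int)))
    = (u.take b).drop a := by
  rw [PySem.List.slice_toNat u (by omega) (by omega)]
  have ha : (min (u.length : Int) (a : Int)).toNat = min u.length a := by omega
  have hb : (min (u.length : Int) (b : Int)).toNat = min u.length b := by omega
  rw [ha, hb, List.drop_take]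
  rcases le_total a u.length with h | h
  · have e1 : min u.length a = a := by omega
    rw [e1]
    rcases le_total b u.length with h2 | h2
    · have e2 : min u.length b = b := by omega
      rw [e2]
    · have e2 : min u.length b = u.length := by omega
      rw [e2]
      rw [List.take_of_length_le (by simp), List.take_of_length_le (by simp; omega)]
  · have e1 : min u.length a = u.length := by omega
    rw [e1]
    simp [List.drop_eq_nil_iff, h]
theorem pvDropClamp (u : List String) (a : Nat) :
    PySem.List.slice u (some (min (u.length : Int) (a : Int))) none = u.drop a := by
  rw [PySem.List.slice_from u (by omega)]
  have ha : (min (u.length : Int) (a : Int)).toNat = min u.length a := by omega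
  rw [ha]
  rcases le_total a u.length with h | h
  · rw [min_eq_right h]
  · rw [min_eq_left h]
    simp [List.drop_eq_nil_iff, h]
theorem pvSliceClampI (u : List String) (a b : Int) (ha : 0 ≤ a) (hb : 0 ≤ b) :
    PySem.List.slice u (some (min (u.length : Int) a)) (some (min (u.length : Int) b))
    = (u.take b.toNat).drop a.toNat := by
  have h1 : a = ((a.toNat : Nat) : Int) := by omega
  have h2 : b = ((b.toNat : Nat) : Int) := by omega
  rw [h1, h2, pvSliceClamp u a.toNat b.toNat]
  have ea : ((a.toNat : Int)).toNat = a.toNat := by omega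
  have eb : ((b.toNat : Int)).toNat = b.toNat := by omega
  rw [ea, eb]

theorem pvDropClampI (u : List String) (a : Int) (ha : 0 ≤ a) :
    PySem.List.slice u (some (min (u.length : Int) a)) none = u.drop a.toNat := by
  have h1 : a = ((a.toNat : Nat) : Int) := by omega
  rw [h1, pvDropClamp u a.toNat]
  have ea : ((a.toNat : Int)).toNat = a.toNat := by omega
  rw [ea]

theorem pv_main (ranked : List String) :
    tier_buckets_from_ranked_py ranked = tier_buckets_from_ranked_py_alt ranked := by
  rw [tier_buckets_from_ranked_py, tier_buckets_from_ranked_py_alt]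
  rw [pvB_fold, pvBCore_items]
  by_cases hr : ranked = []
  · subst hr
    simp [pvDedup]
  · rw [if_neg hr]
    show (List.filter _ _) = _
    rw [pvA_fold_snd]
    simp only [pvSizePairs, List.foldl_cons, List.foldl_nil]
    set u := pvDedup PySem.Set.empty ranked with hu
    simp only [List.nil_append, PySem.List.len]
    have m0 : (0:Int) + 100 = 100 := by norm_num
    have e2 : min (u.length : Int) (min (u.length : Int) 100 + 200) = min (u.length : Int) 300 := by omega
    have e3 : min (u.length : Int) (min (u.length : Int) 300 + 400) = min (u.length : Int) 700 := by omega
    have e4 : min (u.length : Int) (min (u.length : Int) 700 + 800) = min (u.length : Int) 1500 := by omega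
    have e5 : min (u.length : Int) (min (u.length : Int) 1500 + 1600) = min (u.length : Int) 3100 := by omega
    rw [m0, e2, e3, e4, e5]
    rw [pvSliceClampI u 100 300 (by norm_num) (by norm_num),
        pvSliceClampI u 300 700 (by norm_num) (by norm_num),
        pvSliceClampI u 700 1500 (by norm_num) (by norm_num),
        pvSliceClampI u 1500 3100 (by norm_num) (by norm_num),
        pvDropClampI u 3100 (by norm_num)]
    rw [PySem.List.slice_zero_start, PySem.List.slice_to u (by omega)]
    have eS : (min (u.length : Int) 100).toNat = min u.length 100 := by omega
    have eS2 : u.take (min u.length 100) = u.take 100 := by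
      rcases le_total u.length 100 with h | h
      · rw [min_eq_left h, List.take_of_length_le le_rfl, List.take_of_length_le h]
      · rw [min_eq_right h]
    rw [eS, eS2]
    norm_num
    simp [PySem.Dict.items_insert_of_not_contains, PySem.Dict.contains_insert,
      PySem.Dict.contains_empty]
    intro a b h
    simp [PySem.Dict.empty, PySem.Dict.items] at h

-- ===== VERDICT (by name: the statement is the Claim_ definition above) =====
theorem tier_buckets_from_ranked_py_spec : Claim_equal_tier_buckets_from_ranked_py := by
  intro ranked _
  unfold Spec_tier_buckets_from_ranked_py
  exact pv_main ranked
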